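-- pv_equiv track=rewrite | github.com/gabesnow99/WizardChessCode | Final Code/final_BETA/ScreenRead.py | rank_to_fen
-- ===== SOURCE A (Python) =====
-- def rank_to_fen(rank):
--     # Example: row = ['r', 'n', 'b', 'q', 'k', 'b', 'n', 'r']
--     fen = ''
--     empty = 0
--     for square in rank:
--         if square == '':
--             empty += 1
--         else:
--             if empty:
--                 fen += str(empty)
--                 empty = 0
--             fen += square[1].lower() if square[0] == 'b' else square[1].upper()
--     if empty:
--         fen += str(empty)
--     return fen
-- ===== SOURCE B (Python) =====
-- def rank_to_fen(rank):
--     # Pass 1: map each square to its FEN piece char (None marks an empty square).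
--     cells = [None if sq == '' else (sq[1].lower() if sq[0] == 'b' else sq[1].upper())
--              for sq in rank]
--     # Pass 2: run-length-compress the None runs with an index scan.
--     out = []
--     i = 0
--     n = len(cells)
--     while i < n:
--         if cells[i] is None:
--             j = i
--             while j < n and cells[j] is None:
--                 j += 1
--             out.append(str(j - i))
--             i = j
--         else:
--             out.append(cells[i])
--             i += 1
--     return ''.join(out)
-- ===== Notes on version B (the rewrite author's own statement) =====
-- stated objective: idiomatic
-- what changed: Replaces the inline counter-with-flush fold by a two-pass map-then-compress: first map every square to an Option piece char, then run-length-compress the empty runs in a second scan and join.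
import Mathlib
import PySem

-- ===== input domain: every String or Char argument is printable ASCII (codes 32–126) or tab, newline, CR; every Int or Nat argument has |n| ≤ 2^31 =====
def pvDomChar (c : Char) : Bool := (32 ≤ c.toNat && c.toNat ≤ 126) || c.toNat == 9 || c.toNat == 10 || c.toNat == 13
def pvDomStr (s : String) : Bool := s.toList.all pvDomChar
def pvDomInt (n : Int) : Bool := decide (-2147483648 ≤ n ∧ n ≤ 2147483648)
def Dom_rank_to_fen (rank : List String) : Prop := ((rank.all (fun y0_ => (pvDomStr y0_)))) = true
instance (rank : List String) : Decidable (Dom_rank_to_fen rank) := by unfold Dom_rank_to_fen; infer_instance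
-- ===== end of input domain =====

-- B replaces A's inline counter-with-flush fold by a two-pass map-then-run-length-compress (idiomatic decomposition, same cost).

-- ===== PORT A =====
-- A: one fold over the rank carrying (fen, empty); flush the counter before each piece and at the end.
def rank_to_fen (rank : List String) : String :=
  let st := rank.foldl (fun (st : List Char × Int) square =>
    if square.toList = [] then (st.1, st.2 + 1)
    else
      let fen := if st.2 ≠ 0 then st.1 ++ PySem.Int.toChars st.2 else st.1
      let c0 := (PySem.List.pyGet? square.toList 0).getD ' '   -- square[0]; Pre_ excludes the IndexError case
      let c1 := (PySem.List.pyGet? square.toList 1).getD ' '   -- square[1]; Pre_ excludes the IndexError case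
      (fen ++ [if c0 = 'b' then PySem.Chars.lowerChar c1 else PySem.Chars.upperChar c1], 0))
    ([], 0)
  String.ofList (if st.2 ≠ 0 then st.1 ++ PySem.Int.toChars st.2 else st.1)

-- ===== PORT B =====
-- cell: '' ↦ none, otherwise the FEN piece char (sq[1] cased by sq[0]).
def pvCell (sq : String) : Option Char :=
  if sq.toList = [] then none
  else
    let c0 := (PySem.List.pyGet? sq.toList 0).getD ' '   -- sq[0]; Pre_ excludes the IndexError case
    let c1 := (PySem.List.pyGet? sq.toList 1).getD ' '   -- sq[1]; Pre_ excludes the IndexError case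
    some (if c0 = 'b' then PySem.Chars.lowerChar c1 else PySem.Chars.upperChar c1)

-- the inner 'while j < n and cells[j] is None' scan: length of the leading none-run and the remainder
def pvRun : List (Option Char) → Nat × List (Option Char)
  | none :: rest => let p := pvRun rest; (p.1 + 1, p.2)
  | l => (0, l)

theorem pvRun_nil : pvRun [] = (0, []) := rfl
theorem pvRun_some (c : Char) (l : List (Option Char)) :
    pvRun (some c :: l) = (0, some c :: l) := rfl
theorem pvRun_none (l : List (Option Char)) :
    pvRun (none :: l) = ((pvRun l).1 + 1, (pvRun l).2) := rfl

theorem pvRun_len_le (l : List (Option Char)) : (pvRun l).2.length ≤ l.length := by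
  induction l with
  | nil => simp [pvRun_nil]
  | cons c rest ih =>
      cases c with
      | none => rw [pvRun_none]; simp; omega
      | some c => rw [pvRun_some]

-- the outer while loop: emit pieces, replace each none-run by its length
def pvCompress : List (Option Char) → List Char
  | [] => []
  | some c :: rest => c :: pvCompress rest
  | none :: rest =>
      PySem.Int.toChars (((pvRun rest).1 : Int) + 1) ++ pvCompress (pvRun rest).2
termination_by cs => cs.length
decreasing_by
  · simp
  · have := pvRun_len_le rest; simp; omega

def rank_to_fen_alt (rank : List String) : String :=
  String.ofList (pvCompress (rank.map pvCell))

-- ===== PRECONDITION & SPEC =====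
-- Pre_ excludes ranks containing a nonempty square of length 1, on which Python A raises IndexError at square[1].
def Pre_rank_to_fen (rank : List String) : Prop :=
  ∀ sq ∈ rank, sq.toList ≠ [] → 2 ≤ sq.toList.length
instance (rank : List String) : Decidable (Pre_rank_to_fen rank) := by
  unfold Pre_rank_to_fen; infer_instance

def pvWitness_rank_to_fen : List String := ["wr", "", "", "bk", ""]

def Spec_rank_to_fen (rank : List String) (out : String) : Prop := out = rank_to_fen_alt rank
instance (rank : List String) (out : String) : Decidable (Spec_rank_to_fen rank out) := by
  unfold Spec_rank_to_fen; infer_instance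

-- ===== CLAIM (what is proved, stated in full; the proofs are below) =====
def Claim_equal_rank_to_fen : Prop := ∀ (rank : List String), Dom_rank_to_fen rank → Pre_rank_to_fen rank → Spec_rank_to_fen rank (rank_to_fen rank)

-- ===== LEMMAS AND PROOFS =====

-- proof-side normal form: A's remaining output given the pending empty-counter e
def pvGc : Int → List (Option Char) → List Char
  | e, [] => if e ≠ 0 then PySem.Int.toChars e else []
  | e, none :: cs => pvGc (e + 1) cs
  | e, some c :: cs => (if e ≠ 0 then PySem.Int.toChars e else []) ++ c :: pvGc 0 cs

theorem foldA_eq_gc (l : List String) : ∀ (fen : List Char) (e : Int),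
    (let st := l.foldl (fun (st : List Char × Int) square =>
        if square.toList = [] then (st.1, st.2 + 1)
        else
          let fenAcc := if st.2 ≠ 0 then st.1 ++ PySem.Int.toChars st.2 else st.1
          let c0 := (PySem.List.pyGet? square.toList 0).getD ' '
          let c1 := (PySem.List.pyGet? square.toList 1).getD ' '
          (fenAcc ++ [if c0 = 'b' then PySem.Chars.lowerChar c1 else PySem.Chars.upperChar c1], 0))
      (fen, e)
     if st.2 ≠ 0 then st.1 ++ PySem.Int.toChars st.2 else st.1)
    = fen ++ pvGc e (l.map pvCell) := by
  induction l with
  | nil => intro fen e; by_cases he : e = 0 <;> simp [pvGc, he]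
  | cons sq rest ih =>
      intro fen e
      by_cases h : sq.toList = []
      · simp only [List.foldl_cons, List.map_cons, h, if_true]
        simpa [pvCell, h, pvGc] using ih fen (e + 1)
      · simp only [List.foldl_cons, List.map_cons, if_neg h]
        rw [ih]
        by_cases he : e = 0 <;> simp [pvCell, h, pvGc, he, List.append_assoc]

theorem gc_run (cs : List (Option Char)) : ∀ (e : Int), 0 < e →
    pvGc e cs = PySem.Int.toChars (e + (pvRun cs).1) ++ pvGc 0 (pvRun cs).2 := by
  induction cs with
  | nil => intro e he; simp [pvGc, pvRun]; omega
  | cons c cs ih =>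
      intro e he
      match c with
      | none =>
          have h1 : pvGc e (none :: cs) = pvGc (e + 1) cs := rfl
          rw [h1, ih (e + 1) (by omega), pvRun_none]
          have h3 : e + 1 + ((pvRun cs).1 : Int)
              = e + (((pvRun cs).1 + 1 : Nat) : Int) := by push_cast; ring
          rw [h3]
      | some c =>
          have h1 : pvGc e (some c :: cs) =
              (if e ≠ 0 then PySem.Int.toChars e else []) ++ c :: pvGc 0 cs := rfl
          rw [h1, pvRun_some]
          have h2 : pvGc 0 (some c :: cs) =
              (if (0:Int) ≠ 0 then PySem.Int.toChars 0 else []) ++ c :: pvGc 0 cs := rfl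
          rw [h2]
          have he' : e ≠ 0 := by omega
          simp [he']

theorem compress_eq_gc : ∀ (n : Nat) (cs : List (Option Char)), cs.length ≤ n →
    pvCompress cs = pvGc 0 cs := by
  intro n
  induction n with
  | zero =>
      intro cs h
      have : cs = [] := List.eq_nil_of_length_eq_zero (by omega)
      subst this
      simp [pvCompress, pvGc]
  | succ n ih =>
      intro cs h
      match cs with
      | [] => simp [pvCompress, pvGc]
      | some c :: rest =>
          have h1 : pvCompress (some c :: rest) = c :: pvCompress rest := by
            rw [pvCompress]
          have h2 : pvGc 0 (some c :: rest) =
              (if (0:Int) ≠ 0 then PySem.Int.toChars 0 else []) ++ c :: pvGc 0 rest := rfl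
          rw [h1, h2, ih rest (by simp at h; omega)]
          simp
      | none :: rest =>
          have h1 : pvCompress (none :: rest) =
              PySem.Int.toChars (((pvRun rest).1 : Int) + 1) ++ pvCompress (pvRun rest).2 := by
            rw [pvCompress]
          have h2 : pvGc 0 (none :: rest) = pvGc 1 rest := rfl
          rw [h1, h2, gc_run rest 1 (by omega)]
          have hlen := pvRun_len_le rest
          rw [ih (pvRun rest).2 (by simp at h; omega)]
          congr 2
          omega

-- ===== VERDICT (by name: the statement is the Claim_ definition above) =====
theorem rank_to_fen_spec : Claim_equal_rank_to_fen := by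
  intro rank _ _
  unfold Spec_rank_to_fen rank_to_fen rank_to_fen_alt
  rw [compress_eq_gc (rank.map pvCell).length (rank.map pvCell) le_rfl]
  exact congrArg String.ofList ((foldA_eq_gc rank [] 0).trans (by simp))
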